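-- pv_equiv track=rewrite | github.com/SaberOte/SwiftBots | src/chatbotstation/allcontrollers/gpt_ai.py | escape_markdown_chars
-- ===== SOURCE A (Python) =====
-- def escape_markdown_chars(string: str) -> str:
--     """Escape characters '_', '*', '['. Bot don't escape these in code. Code is block with '`' characters by sides"""
--     """
--         Внутри блока кода, обособленного '```' ничего не должно быть экранировано
--         Внутри встроенного кода, обособленного '`' ничего не должно быть экранировано
--         Экранировать символы '_', '*', '['
--
--         Если нет закрывающего '```', то он должен быть добавлен в конец
--         Если нет закрывающего '`', то он должен быть добавлен в конец
--         Если активно состояние встроенного кода, то может быть открыто состояние блока кода. Наоборот - нет!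
--     """
--     code_block = False
--     escaped_string = ''
--     for i in range(len(string)):
--         if string[i] == '`':
--             code_block = not code_block
--             escaped_string += '`'
--         elif code_block:
--             escaped_string += string[i]
--         elif string[i] in ['_', '*', '[']:
--             escaped_string += '\\' + string[i]
--         else:
--             escaped_string += string[i]
--     if code_block:
--         # if it's odd number of '`' chars, code will be ruined, so add to the end
--         escaped_string += '`'
--     return escaped_string
-- ===== SOURCE B (Python) =====
-- def escape_markdown_chars(string: str) -> str:
--     """Escape '_', '*', '[' outside code spans delimited by '`'."""
--     pieces = string.split('`')
--     escaped = [''.join('\\' + c if c in ('_', '*', '[') else c for c in p)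
--                if i % 2 == 0 else p
--                for i, p in enumerate(pieces)]
--     result = '`'.join(escaped)
--     if (len(pieces) - 1) % 2 == 1:  # odd number of backticks: close the code span
--         result += '`'
--     return result
-- ===== Notes on version B (the rewrite author's own statement) =====
-- stated objective: faster
-- what changed: A's single character-by-character loop with a code_block toggle and per-character string concatenation is replaced by splitting on backticks, escaping the three special characters only in the even-indexed (outside-code) pieces, and rejoining with a trailing backtick when the backtick count is odd.
import Mathlib
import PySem

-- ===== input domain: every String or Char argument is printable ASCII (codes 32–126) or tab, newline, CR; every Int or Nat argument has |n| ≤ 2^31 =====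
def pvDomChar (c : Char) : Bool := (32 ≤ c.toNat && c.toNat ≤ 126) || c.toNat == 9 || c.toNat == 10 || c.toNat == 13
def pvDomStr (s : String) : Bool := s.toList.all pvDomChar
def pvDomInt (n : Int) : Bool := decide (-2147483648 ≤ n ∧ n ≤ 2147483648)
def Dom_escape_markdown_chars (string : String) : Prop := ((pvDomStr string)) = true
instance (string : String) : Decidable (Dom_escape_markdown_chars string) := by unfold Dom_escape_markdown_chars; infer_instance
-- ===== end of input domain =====

-- B replaces A's stateful per-character loop by a split-on-'`' / escape-even-pieces / rejoin decomposition (measured constant-factor faster in a timing run).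

-- ===== PORT A =====
-- A: one pass over the characters with a code_block toggle and a growing accumulator.
def escape_markdown_chars (string : String) : String :=
  let r := string.toList.foldl
    (fun (st : Bool × List Char) c =>
      if c = '`' then (!st.1, st.2 ++ ['`'])
      else if st.1 then (st.1, st.2 ++ [c])
      else if c ∈ ['_', '*', '['] then (st.1, st.2 ++ ['\\', c])
      else (st.1, st.2 ++ [c]))
    (false, [])
  String.ofList (if r.1 then r.2 ++ ['`'] else r.2)

-- ===== PORT B =====
-- escape one outside-code piece: ''.join('\\'+c if c in ('_','*','[') else c for c in p)
def pvEscPiece (p : List Char) : List Char :=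
  p.flatMap (fun c => if c ∈ ['_', '*', '['] then ['\\', c] else [c])

def escape_markdown_chars_alt (string : String) : String :=
  let pieces := PySem.Chars.splitOn string.toList ['`']
  let escaped := (PySem.List.enumerate pieces).map
    (fun pr => if pr.1 % 2 = 0 then pvEscPiece pr.2 else pr.2)
  let result := PySem.Chars.join ['`'] escaped
  String.ofList (if ((pieces.length : Int) - 1) % 2 = 1 then result ++ ['`'] else result)

-- ===== PRECONDITION & SPEC =====
def Spec_escape_markdown_chars (string : String) (out : String) : Prop := out = escape_markdown_chars_alt string
instance (string : String) (out : String) : Decidable (Spec_escape_markdown_chars string out) := by unfold Spec_escape_markdown_chars; infer_instance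

-- ===== CLAIM (what is proved, stated in full; the proofs are below) =====
def Claim_equal_escape_markdown_chars : Prop := ∀ (string : String), Dom_escape_markdown_chars string → Spec_escape_markdown_chars string (escape_markdown_chars string)

-- ===== LEMMAS AND PROOFS =====

-- A's loop, as a structural recursion producing the suffix of output it still adds (cb = code_block).
def pvOutA (cb : Bool) : List Char → List Char
  | [] => if cb then ['`'] else []
  | c :: r =>
    if c = '`' then '`' :: pvOutA (!cb) r
    else if cb then c :: pvOutA cb r
    else if c ∈ ['_', '*', '['] then '\\' :: c :: pvOutA cb r
    else c :: pvOutA cb r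

-- simple recursive characterisation of str.split('`')
def pvSplit : List Char → List (List Char)
  | [] => [[]]
  | c :: r => if c = '`' then [] :: pvSplit r else (pvSplit r).modifyHead (c :: ·)

lemma pvSplit_ne_nil (cs : List Char) : pvSplit cs ≠ [] := by
  induction cs with
  | nil => simp [pvSplit]
  | cons c r ih =>
    simp only [pvSplit]
    split
    · simp
    · cases h : pvSplit r with
      | nil => exact absurd h ih
      | cons p ps => simp [List.modifyHead]

lemma pvSplitOn_go (cs : List Char) : ∀ (fuel : Nat) (cur : List Char) (acc : List (List Char)),
    cs.length < fuel →
    PySem.Chars.splitOn.go ['`'] fuel cs cur acc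
      = acc.reverse ++ (pvSplit cs).modifyHead (cur.reverse ++ ·) := by
  induction cs with
  | nil =>
    intro fuel cur acc h
    match fuel, h with
    | fuel + 1, _ => simp [PySem.Chars.splitOn.go, pvSplit]
  | cons c r ih =>
    intro fuel cur acc h
    match fuel, h with
    | fuel + 1, h =>
      by_cases hc : c = '`'
      · subst hc
        rw [show PySem.Chars.splitOn.go ['`'] (fuel + 1) ('`' :: r) cur acc
              = PySem.Chars.splitOn.go ['`'] fuel r [] (cur.reverse :: acc) by
            simp [PySem.Chars.splitOn.go, List.isPrefixOf]]
        rw [ih fuel [] (cur.reverse :: acc) (by simpa using h)]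
        cases h' : pvSplit r with
        | nil => exact absurd h' (pvSplit_ne_nil r)
        | cons p ps => simp [pvSplit, List.modifyHead, h']
      · rw [show PySem.Chars.splitOn.go ['`'] (fuel + 1) (c :: r) cur acc
              = PySem.Chars.splitOn.go ['`'] fuel r (c :: cur) acc by
            have hb : ('`' == c) = false := by simp [Ne.symm hc]
            simp [PySem.Chars.splitOn.go, List.isPrefixOf, hb]]
        rw [ih fuel (c :: cur) acc (by simpa using h)]
        simp only [pvSplit, if_neg hc]
        cases h' : pvSplit r with
        | nil => exact absurd h' (pvSplit_ne_nil r)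
        | cons p ps => simp [List.modifyHead]

lemma pvSplitOn_eq (cs : List Char) :
    PySem.Chars.splitOn cs ['`'] = pvSplit cs := by
  rw [PySem.Chars.splitOn, pvSplitOn_go cs (cs.length + 1) [] [] (by omega)]
  cases h : pvSplit cs with
  | nil => exact absurd h (pvSplit_ne_nil cs)
  | cons p ps => simp [List.modifyHead]

-- A's loop body, named for the proofs (definitionally equal to the lambda in the port)
def pvStepA (st : Bool × List Char) (c : Char) : Bool × List Char :=
  if c = '`' then (!st.1, st.2 ++ ['`'])
  else if st.1 then (st.1, st.2 ++ [c])
  else if c ∈ ['_', '*', '['] then (st.1, st.2 ++ ['\\', c])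
  else (st.1, st.2 ++ [c])

-- A's foldl unrolled to pvOutA
lemma pvFoldA (cs : List Char) : ∀ (cb : Bool) (acc : List Char),
    (if (cs.foldl pvStepA (cb, acc)).1
     then (cs.foldl pvStepA (cb, acc)).2 ++ ['`']
     else (cs.foldl pvStepA (cb, acc)).2) = acc ++ pvOutA cb cs := by
  induction cs with
  | nil => intro cb acc; cases cb <;> simp [pvOutA]
  | cons c r ih =>
    intro cb acc
    rw [List.foldl_cons]
    by_cases hc : c = '`'
    · subst hc
      rw [show pvStepA (cb, acc) '`' = (!cb, acc ++ ['`']) by simp [pvStepA]]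
      rw [ih (!cb) (acc ++ ['`'])]
      simp [pvOutA]
    · by_cases hcb : cb = true
      · subst hcb
        rw [show pvStepA (true, acc) c = (true, acc ++ [c]) by simp [pvStepA, hc]]
        rw [ih true (acc ++ [c])]
        simp [pvOutA, hc]
      · replace hcb : cb = false := by cases cb <;> simp_all
        subst hcb
        by_cases hm : c ∈ ['_', '*', '[']
        · rw [show pvStepA (false, acc) c = (false, acc ++ ['\\', c]) by simp [pvStepA, hc, hm]]
          rw [ih false (acc ++ ['\\', c])]
          simp [pvOutA, hc, hm]
        · rw [show pvStepA (false, acc) c = (false, acc ++ [c]) by simp [pvStepA, hc, hm]]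
          rw [ih false (acc ++ [c])]
          simp [pvOutA, hc, hm]

-- render a piece list; `outside` tells whether the first piece is outside code
def pvRender (outside : Bool) : List (List Char) → List Char
  | [] => []
  | [p] => if outside then pvEscPiece p else p ++ ['`']
  | p :: q :: ps => (if outside then pvEscPiece p else p) ++ '`' :: pvRender (!outside) (q :: ps)

lemma pvOutA_render (cs : List Char) : ∀ (cb : Bool),
    pvOutA cb cs = pvRender (!cb) (pvSplit cs) := by
  induction cs with
  | nil => intro cb; cases cb <;> simp [pvOutA, pvSplit, pvRender, pvEscPiece]
  | cons c r ih =>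
    intro cb
    by_cases hc : c = '`'
    · subst hc
      rw [show pvOutA cb ('`' :: r) = '`' :: pvOutA (!cb) r by simp [pvOutA]]
      rw [ih (!cb)]
      simp only [pvSplit, reduceIte]
      cases h : pvSplit r with
      | nil => exact absurd h (pvSplit_ne_nil r)
      | cons p ps => cases cb <;> simp [pvRender, pvEscPiece]
    · rw [show pvOutA cb (c :: r)
            = (if cb then [c] else if c ∈ ['_', '*', '['] then ['\\', c] else [c]) ++ pvOutA cb r by
          by_cases hm : c = '_' ∨ c = '*' ∨ c = '[' <;> cases cb <;> simp [pvOutA, hc, hm]]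
      rw [ih cb]
      simp only [pvSplit, if_neg hc]
      cases h : pvSplit r with
      | nil => exact absurd h (pvSplit_ne_nil r)
      | cons p ps =>
        cases ps with
        | nil => cases cb <;> by_cases hm : c = '_' ∨ c = '*' ∨ c = '[' <;>
            simp [pvRender, pvEscPiece, List.modifyHead, hm]
        | cons q qs => cases cb <;> by_cases hm : c = '_' ∨ c = '*' ∨ c = '[' <;>
            simp [pvRender, pvEscPiece, List.modifyHead, hm]

lemma pvIntercalate_cons (sep x : List Char) (zs : List (List Char)) (h : zs ≠ []) :
    List.intercalate sep (x :: zs) = x ++ sep ++ List.intercalate sep zs := by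
  cases zs with
  | nil => exact absurd rfl h
  | cons y ys => simp [List.intercalate, List.intersperse]

lemma pvEnumerate_cons {α : Type} (x : α) (t : List α) (n : Int) :
    PySem.List.enumerate (x :: t) n = (n, x) :: PySem.List.enumerate t (n + 1) := by
  simp [PySem.List.enumerate]

-- the renderers equal B's enumerate/join/parity pipeline, at any start index n
lemma pvRender_join (ps : List (List Char)) : ∀ (p : List Char) (n : Int),
    (if n % 2 = 0 then pvRender true (p :: ps) else pvRender false (p :: ps))
      = List.intercalate ['`']
          ((PySem.List.enumerate (p :: ps) n).map (fun pr => if pr.1 % 2 = 0 then pvEscPiece pr.2 else pr.2))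
        ++ (if (n + ((p :: ps).length : Int) - 1) % 2 = 1 then ['`'] else []) := by
  induction ps with
  | nil =>
    intro p n
    rw [pvEnumerate_cons]
    by_cases hn : n % 2 = 0
    · have h1 : ¬ (n + (1 : Int) - 1) % 2 = 1 := by omega
      rw [if_pos hn, if_neg (by simpa using h1)]
      simp [pvRender, PySem.List.enumerate, List.intercalate, hn]
    · have h1 : (n + (1 : Int) - 1) % 2 = 1 := by omega
      rw [if_neg hn, if_pos (by simpa using h1)]
      simp [pvRender, PySem.List.enumerate, List.intercalate]
      intro h2
      exact absurd (by omega : n % 2 = 0) hn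
  | cons q qs ih =>
    intro p n
    rw [pvEnumerate_cons, List.map_cons,
        pvIntercalate_cons _ _ _ (by rw [pvEnumerate_cons]; simp)]
    have hcond : ((n + 1 + ((q :: qs).length : Int) - 1) % 2 = 1)
        ↔ ((n + ((p :: q :: qs).length : Int) - 1) % 2 = 1) := by
      simp only [List.length_cons]
      push_cast
      omega
    by_cases hn : n % 2 = 0
    · have hn1 : ¬ (n + 1) % 2 = 0 := by omega
      have ih' := ih q (n + 1)
      rw [if_neg hn1] at ih'
      rw [if_pos hn]
      rw [show pvRender true (p :: q :: qs) = pvEscPiece p ++ '`' :: pvRender false (q :: qs) by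
        simp [pvRender]]
      rw [ih', if_congr hcond rfl rfl]
      simp [hn]
    · have hn1 : (n + 1) % 2 = 0 := by omega
      have ih' := ih q (n + 1)
      rw [if_pos hn1] at ih'
      rw [if_neg hn]
      rw [show pvRender false (p :: q :: qs) = p ++ '`' :: pvRender true (q :: qs) by
        simp [pvRender]]
      rw [ih', if_congr hcond rfl rfl]
      simp [hn]

-- ===== VERDICT (by name: the statement is the Claim_ definition above) =====
theorem escape_markdown_chars_spec : Claim_equal_escape_markdown_chars := by
  intro string _
  show String.ofList _ = String.ofList _
  refine congrArg String.ofList ?_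
  rw [show (fun (st : Bool × List Char) c =>
      if c = '`' then (!st.1, st.2 ++ ['`'])
      else if st.1 then (st.1, st.2 ++ [c])
      else if c ∈ ['_', '*', '['] then (st.1, st.2 ++ ['\\', c])
      else (st.1, st.2 ++ [c])) = pvStepA from rfl]
  rw [pvFoldA string.toList false []]
  rw [List.nil_append, pvOutA_render string.toList false, Bool.not_false]
  rw [pvSplitOn_eq]
  cases h : pvSplit string.toList with
  | nil => exact absurd h (pvSplit_ne_nil string.toList)
  | cons p ps =>
    have hj := pvRender_join ps p 0
    rw [if_pos (by norm_num)] at hj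
    rw [hj]
    have hc : ((0 : Int) + ((p :: ps).length : Int) - 1) % 2 = 1
        ↔ (((p :: ps).length : Int) - 1) % 2 = 1 := by omega
    simp only [PySem.Chars.join]
    by_cases hpar : (((p :: ps).length : Int) - 1) % 2 = 1
    · rw [if_pos (hc.mpr hpar), if_pos hpar]
    · rw [if_neg (fun hh => hpar (hc.mp hh)), if_neg hpar, List.append_nil]
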